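-- pv_equiv track=rewrite | github.com/abkhan505/json_converter | jsonconv.py | transform_params
-- ===== SOURCE A (Python) =====
-- def transform_params(params):
--     speaker = None
--     text = []
--
--     for param in params:
--         if isinstance(param, str):
--             if param in ["Lucia", "Liv", "Lee"]:
--                 speaker = param
--             else:
--                 text.append(param)
--         elif isinstance(param, int):
--             text.append(str(param))
--         elif isinstance(param, float):
--             text.append(str(int(param)))  # Convert float to int, then to string
--         else:
--             text.append(str(param))
--
--     return {
--         "speaker": speaker,
--         "text": " ".join(text)
--     }
-- ===== SOURCE B (Python) =====
-- _NAMES = {"Lucia", "Liv", "Lee"}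
--
-- def _conv(p):
--     if isinstance(p, str):
--         return p
--     if isinstance(p, float):
--         return str(int(p))
--     return str(p)
--
-- def transform_params(params):
--     speaker = next((p for p in reversed(params)
--                     if isinstance(p, str) and p in _NAMES), None)
--     text = " ".join(_conv(p) for p in params
--                     if not (isinstance(p, str) and p in _NAMES))
--     return {"speaker": speaker, "text": text}
-- ===== Notes on version B (the rewrite author's own statement) =====
-- stated objective: simpler
-- what changed: Replaces A's single loop that threads a (speaker, text) state with two independent passes: speaker is the last name found scanning the reversed list, and text is a join over a filtered comprehension.
import Mathlib
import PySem

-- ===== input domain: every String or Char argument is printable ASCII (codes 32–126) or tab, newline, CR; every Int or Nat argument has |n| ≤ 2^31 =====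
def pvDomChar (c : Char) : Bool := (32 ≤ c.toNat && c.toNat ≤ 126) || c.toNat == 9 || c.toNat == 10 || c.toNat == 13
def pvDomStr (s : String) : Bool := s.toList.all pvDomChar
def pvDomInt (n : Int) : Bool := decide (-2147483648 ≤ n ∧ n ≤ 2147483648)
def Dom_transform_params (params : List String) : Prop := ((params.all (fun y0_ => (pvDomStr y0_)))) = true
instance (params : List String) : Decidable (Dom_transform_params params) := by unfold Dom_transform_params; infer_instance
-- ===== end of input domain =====

-- B separates A's single intertwined loop into two passes: speaker = last name found
-- (scan of the reversed list) and text = join of the filtered list; same cost, simpler decomposition.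
-- Pre_ excludes inputs with no speaker name, where Python A returns None (not a str) for "speaker".


-- ===== PORT A =====
-- single loop over params carrying (speaker, text) state; the int/float branches of the
-- Python are unreachable here since every parameter is a string
def isSpeakerName (p : String) : Bool := p == "Lucia" || p == "Liv" || p == "Lee"

def transform_params (params : List String) : List (String × String) :=
  let res := params.foldl
    (fun (acc : Option String × List String) p =>
      if isSpeakerName p then (some p, acc.2) else (acc.1, acc.2 ++ [p]))
    (none, [])
  [("speaker", res.1.getD ""), ("text", PySem.Str.join " " res.2)]

-- ===== PORT B =====
def transform_params_alt (params : List String) : List (String × String) :=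
  let speaker := (params.reverse.find? isSpeakerName).getD ""
  let text := PySem.Str.join " " (params.filter (fun p => !isSpeakerName p))
  [("speaker", speaker), ("text", text)]

-- ===== PRECONDITION & SPEC =====
-- Pre_ excludes inputs containing no speaker name: there Python A returns {'speaker': None, …},
-- and None is not a value of the declared String type (B's Python returns the same dict there).
def Pre_transform_params (params : List String) : Prop :=
  (params.any isSpeakerName) = true
instance (params : List String) : Decidable (Pre_transform_params params) := by unfold Pre_transform_params; infer_instance

def pvWitness_transform_params : List String := ["hello", "Liv", "world"]

def Spec_transform_params (params : List String) (out : List (String × String)) : Prop := out = transform_params_alt params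
instance (params : List String) (out : List (String × String)) : Decidable (Spec_transform_params params out) := by unfold Spec_transform_params; infer_instance

-- ===== CLAIM (what is proved, stated in full; the proofs are below) =====
def Claim_equal_transform_params : Prop := ∀ (params : List String), Dom_transform_params params → Pre_transform_params params → Spec_transform_params params (transform_params params)

-- ===== LEMMAS AND PROOFS =====

-- A's loop state equals (last speaker name found, defaulting to the incoming one; text so far ++ filtered rest)
lemma loop_char (params : List String) (s : Option String) (t : List String) :
    params.foldl
      (fun (acc : Option String × List String) p =>
        if isSpeakerName p then (some p, acc.2) else (acc.1, acc.2 ++ [p]))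
      (s, t)
    = ((params.reverse.find? isSpeakerName).or s,
       t ++ params.filter (fun p => !isSpeakerName p)) := by
  induction params generalizing s t with
  | nil => simp
  | cons p ps ih =>
    simp only [List.foldl_cons, List.reverse_cons, List.find?_append, List.filter_cons]
    by_cases h : isSpeakerName p = true
    · simp [h, ih]
    · simp [h, ih, List.find?]

-- ===== VERDICT (by name: the statement is the Claim_ definition above) =====
theorem transform_params_spec : Claim_equal_transform_params := by
  intro params _ _
  unfold Spec_transform_params transform_params transform_params_alt
  rw [loop_char]
  cases params.reverse.find? isSpeakerName <;> simp [Option.or]
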